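-- pv_equiv track=rewrite | github.com/PunyGoood/VeriEquivBench | metrics/dafny_parser.py | is_fuzzy_match
-- ===== SOURCE A (Python) =====
-- def is_fuzzy_match(original: str, modified: str) -> bool:
--     """
--     Check if modified is original with inserted lines and/or whitespace changes.
--
--     Returns True if every non-empty line of original appears in modified in order.
--     """
--     original_lines = [line.strip() for line in original.splitlines() if line.strip()]
--     modified_lines = [line.strip() for line in modified.splitlines() if line.strip()]
--     j = 0
--     for orig_line in original_lines:
--         while j < len(modified_lines) and modified_lines[j] != orig_line:
--             j += 1
--         if j >= len(modified_lines):
--             return False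
--         j += 1
--     return True
-- ===== SOURCE B (Python) =====
-- def is_fuzzy_match(original: str, modified: str) -> bool:
--     """True iff every non-empty stripped line of original appears, in order, in modified."""
--     remaining = [line.strip() for line in original.splitlines() if line.strip()]
--     remaining.reverse()  # stack: the next original line to match sits on top
--     for line in modified.splitlines():
--         if remaining and line.strip() == remaining[-1]:
--             remaining.pop()
--     return not remaining
-- ===== Notes on version B (the rewrite author's own statement) =====
-- stated objective: alternative
-- what changed: The loop roles are inverted: instead of iterating over original's lines and scanning modified with an inner while/cursor, B makes a single pass over modified's raw lines (no prefiltered modified list) and maintains a stack of original's pending stripped lines, popping the top on each match; the answer is whether the stack is empty, with no inner loop and no early return.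
import Mathlib
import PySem

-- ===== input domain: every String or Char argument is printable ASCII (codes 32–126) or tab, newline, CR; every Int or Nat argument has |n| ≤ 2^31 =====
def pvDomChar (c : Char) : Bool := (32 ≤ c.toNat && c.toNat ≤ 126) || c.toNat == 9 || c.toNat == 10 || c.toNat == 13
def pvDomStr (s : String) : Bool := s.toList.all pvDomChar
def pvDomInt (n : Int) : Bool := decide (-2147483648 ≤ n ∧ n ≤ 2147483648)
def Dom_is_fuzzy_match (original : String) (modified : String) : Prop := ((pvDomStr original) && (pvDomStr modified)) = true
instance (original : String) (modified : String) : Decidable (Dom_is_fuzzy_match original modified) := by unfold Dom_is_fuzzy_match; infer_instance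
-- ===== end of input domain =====

-- B inverts the traversal: one pass over modified's raw lines with a stack of original's pending stripped lines (popped on match), instead of A's loop over original with an inner cursor scan of a prefiltered modified list; alternative decomposition, same cost.


-- ===== PORT A =====
-- [line.strip() for line in s.splitlines() if line.strip()]
def pvPrepLines (s : String) : List String :=
  ((PySem.Str.splitlines s).map PySem.Str.strip).filter (fun l => l ≠ "")

-- the inner 'while j < len(modified_lines) and modified_lines[j] != orig_line: j += 1'
def pvScanFrom (ms : List String) (o : String) (j : Nat) : Nat :=
  if h : j < ms.length then
    if ms[j] = o then j else pvScanFrom ms o (j + 1)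
  else j
termination_by ms.length - j

-- the outer 'for orig_line in original_lines' with cursor j and early return False
def pvALoop : List String → List String → Nat → Bool
  | [], _, _ => true
  | o :: os, ms, j =>
    let j' := pvScanFrom ms o j
    if j' ≥ ms.length then false else pvALoop os ms (j' + 1)

def is_fuzzy_match (original : String) (modified : String) : Bool :=
  pvALoop (pvPrepLines original) (pvPrepLines modified) 0

-- ===== PORT B =====
-- the loop body 'if remaining and line.strip() == remaining[-1]: remaining.pop()'.
-- Python keeps the stack as a reversed list so pop() from the end is O(1); here the
-- stack top is the list head, consumed in the same order.
def pvBStep (stack : List String) (line : String) : List String :=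
  match stack with
  | [] => stack
  | top :: rest => if PySem.Str.strip line = top then rest else stack

-- 'for line in modified.splitlines(): ...; return not remaining'
def is_fuzzy_match_alt (original : String) (modified : String) : Bool :=
  ((PySem.Str.splitlines modified).foldl pvBStep (pvPrepLines original)) == []

-- ===== PRECONDITION & SPEC =====
def Spec_is_fuzzy_match (original : String) (modified : String) (out : Bool) : Prop := out = is_fuzzy_match_alt original modified
instance (original : String) (modified : String) (out : Bool) : Decidable (Spec_is_fuzzy_match original modified out) := by unfold Spec_is_fuzzy_match; infer_instance

-- ===== CLAIM (what is proved, stated in full; the proofs are below) =====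
def Claim_equal_is_fuzzy_match : Prop := ∀ (original : String) (modified : String), Dom_is_fuzzy_match original modified → Spec_is_fuzzy_match original modified (is_fuzzy_match original modified)

-- ===== LEMMAS AND PROOFS =====

-- proof-side bridge: per-original-line consumption of the modified list (used only in lemmas)
def pvConsume : List String → String → Option (List String)
  | [], _ => none
  | m :: ms, o => if m = o then some ms else pvConsume ms o

def pvBLoop : List String → List String → Bool
  | [], _ => true
  | o :: os, ms =>
    match pvConsume ms o with
    | some rest => pvBLoop os rest
    | none => false

-- pvBStep on an already-stripped line
def pvStep' (stack : List String) (m : String) : List String :=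
  match stack with
  | [] => stack
  | top :: rest => if m = top then rest else stack

-- consuming the iterator 'ms.drop j' equals scanning from index j with A's while loop
theorem pvConsume_drop (ms : List String) (o : String) (j : Nat) :
    pvConsume (ms.drop j) o =
      if pvScanFrom ms o j < ms.length then some (ms.drop (pvScanFrom ms o j + 1)) else none := by
  by_cases h : j < ms.length
  · have hdrop : ms.drop j = ms[j] :: ms.drop (j + 1) := List.drop_eq_getElem_cons h
    rw [hdrop]
    unfold pvScanFrom
    simp only [h, dif_pos]
    by_cases he : ms[j] = o
    · simp [pvConsume, he, h]
    · have : pvConsume (ms[j] :: ms.drop (j + 1)) o = pvConsume (ms.drop (j + 1)) o := by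
        simp [pvConsume, he]
      rw [this, pvConsume_drop ms o (j + 1)]
      simp [he]
  · have hdrop : ms.drop j = [] := List.drop_eq_nil_of_le (le_of_not_gt h)
    have hs : pvScanFrom ms o j = j := by unfold pvScanFrom; simp [h]
    rw [hdrop, hs]
    simp [pvConsume, h]
termination_by ms.length - j
decreasing_by omega

theorem pvALoop_eq_pvBLoop (os : List String) (ms : List String) (j : Nat) :
    pvALoop os ms j = pvBLoop os (ms.drop j) := by
  induction os generalizing j with
  | nil => simp [pvALoop, pvBLoop]
  | cons o os ih =>
    simp only [pvALoop, pvBLoop, pvConsume_drop ms o j]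
    by_cases h : pvScanFrom ms o j < ms.length
    · simp only [h, if_pos, not_le.mpr h]
      simp [ih]
    · simp [h, not_lt.mp h]

-- the empty stack absorbs any further input
theorem pvFoldStep'_nil (ms : List String) : ms.foldl pvStep' [] = [] := by
  induction ms with
  | nil => rfl
  | cons m ms ih => simpa [pvStep'] using ih

-- B's fold over the raw lines equals a fold of pvStep' over the stripped, filtered lines,
-- provided every pending stack element is non-empty
theorem pvFold_raw_eq_filtered (lines : List String) (os : List String)
    (h : ∀ x ∈ os, x ≠ "") :
    lines.foldl pvBStep os
      = ((lines.map PySem.Str.strip).filter (fun l => l ≠ "")).foldl pvStep' os := by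
  induction lines generalizing os with
  | nil => rfl
  | cons line lines ih =>
    simp only [List.foldl_cons, List.map_cons, List.filter_cons]
    by_cases hm : PySem.Str.strip line = ""
    · have hstep : pvBStep os line = os := by
        cases os with
        | nil => rfl
        | cons t r =>
          have ht : t ≠ "" := h t (List.mem_cons_self ..)
          simp only [pvBStep, hm]
          exact if_neg (fun hc => ht hc.symm)
      rw [hstep, if_neg (by simp [hm])]
      exact ih os h
    · have hstep : pvBStep os line = pvStep' os (PySem.Str.strip line) := by
        cases os <;> simp [pvBStep, pvStep']
      have hpres : ∀ x ∈ pvStep' os (PySem.Str.strip line), x ≠ "" := by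
        intro x hx
        cases os with
        | nil => simp [pvStep'] at hx
        | cons t r =>
          by_cases hc : PySem.Str.strip line = t
          · simp only [pvStep', if_pos hc] at hx
            exact h x (List.mem_cons_of_mem _ hx)
          · simp only [pvStep', if_neg hc] at hx
            exact h x hx
      rw [hstep, if_pos (by simp [hm]), List.foldl_cons]
      exact ih _ hpres

-- the per-original-line consumption equals the fold of pvStep' over the modified lines
theorem pvBLoop_eq_fold (ms : List String) (os : List String) :
    pvBLoop os ms = ((ms.foldl pvStep' os) == []) := by
  induction ms generalizing os with
  | nil => cases os <;> simp [pvBLoop, pvConsume]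
  | cons m ms ih =>
    rw [List.foldl_cons]
    cases os with
    | nil =>
      have h2 : pvStep' [] m = [] := rfl
      rw [h2]
      simp [pvBLoop, pvFoldStep'_nil]
    | cons o os =>
      by_cases hc : m = o
      · have h1 : pvBLoop (o :: os) (m :: ms) = pvBLoop os ms := by
          simp [pvBLoop, pvConsume, hc]
        have h2 : pvStep' (o :: os) m = os := by simp [pvStep', hc]
        rw [h1, h2, ih]
      · have h1 : pvBLoop (o :: os) (m :: ms) = pvBLoop (o :: os) ms := by
          simp [pvBLoop, pvConsume, hc]
        have h2 : pvStep' (o :: os) m = o :: os := by simp [pvStep', hc]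
        rw [h1, h2, ih]

theorem pvPrep_nonempty (s : String) : ∀ x ∈ pvPrepLines s, x ≠ "" := by
  intro x hx
  unfold pvPrepLines at hx
  have := List.of_mem_filter hx
  simpa using this

-- ===== VERDICT (by name: the statement is the Claim_ definition above) =====
theorem is_fuzzy_match_spec : Claim_equal_is_fuzzy_match := by
  intro original modified _
  unfold Spec_is_fuzzy_match is_fuzzy_match is_fuzzy_match_alt
  rw [pvALoop_eq_pvBLoop, List.drop_zero, pvBLoop_eq_fold,
    pvFold_raw_eq_filtered _ _ (pvPrep_nonempty original)]
  rfl
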